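-- pv_equiv track=rewrite | github.com/oneilstokeseqrm/NodeRAG | NodeRAG/utils/id_generation.py | validate_id_format
-- ===== SOURCE A (Python) =====
-- def validate_id_format(node_id: str) -> bool:
--     """Validate that a node ID follows the expected format"""
--     if not node_id or not isinstance(node_id, str):
--         return False
--
--     parts = node_id.split('_')
--     if len(parts) != 2:
--         return False
--
--     prefix, hash_part = parts
--     valid_prefixes = ['doc', 'sem', 'ent', 'rel', 'attr', 'comm']
--
--     return (prefix in valid_prefixes and
--             len(hash_part) == 16 and
--             all(c in '0123456789abcdef' for c in hash_part))
-- ===== SOURCE B (Python) =====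
-- def validate_id_format(node_id: str) -> bool:
--     """Validate that a node ID follows the expected format"""
--     if not node_id or not isinstance(node_id, str):
--         return False
--     for prefix in ('doc', 'sem', 'ent', 'rel', 'attr', 'comm'):
--         if node_id.startswith(prefix + '_'):
--             tail = node_id[len(prefix) + 1:]
--             return len(tail) == 16 and all(c in '0123456789abcdef' for c in tail)
--     return False
-- ===== Notes on version B (the rewrite author's own statement) =====
-- stated objective: idiomatic
-- what changed: Replaces the split/length-2/unpack validation with a direct scan over the six valid prefixes using startswith and a hex check on the 16-char slice after the separator, so no split or tuple unpack remains.
import Mathlib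
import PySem

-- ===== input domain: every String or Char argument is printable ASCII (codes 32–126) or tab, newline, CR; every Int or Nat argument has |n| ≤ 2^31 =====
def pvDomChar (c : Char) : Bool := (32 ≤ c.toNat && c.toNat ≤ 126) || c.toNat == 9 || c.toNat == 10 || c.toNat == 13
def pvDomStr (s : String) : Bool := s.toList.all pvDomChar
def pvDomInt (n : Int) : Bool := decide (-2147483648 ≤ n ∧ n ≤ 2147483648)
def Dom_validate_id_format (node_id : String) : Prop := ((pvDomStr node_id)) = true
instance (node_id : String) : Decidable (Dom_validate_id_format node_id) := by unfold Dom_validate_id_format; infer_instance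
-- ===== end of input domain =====

-- B replaces A's split/len-check/unpack validation by a scan over the prefix tuple with
-- startswith and a hex check on the slice after the underscore (idiomatic; no split).


-- ===== PORT A =====
-- 'not isinstance(node_id, str)' is vacuous here (the argument is always a str);
-- 'not node_id' is the emptiness test.
def validate_id_format (node_id : String) : Bool :=
  if node_id.toList.isEmpty then false
  else
    -- parts = node_id.split('_')  (separator nonempty, so PySem.Chars.splitOn is exact)
    let parts := PySem.Chars.splitOn node_id.toList ['_']
    if parts.length ≠ 2 then false
    else
      match parts with
      | [pre, hash_part] =>
          -- prefix in valid_prefixes and len(hash_part) == 16 and all(c in '0123…f' for c in hash_part)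
          ["doc".toList, "sem".toList, "ent".toList, "rel".toList, "attr".toList, "comm".toList].contains pre
            && hash_part.length == 16
            && hash_part.all (fun c => PySem.Chars.isIn [c] "0123456789abcdef".toList)
      | _ => false  -- unreachable: parts.length = 2 here

-- ===== PORT B =====
-- the for-loop over the prefix tuple; returns at the first prefix whose 'prefix_' starts node_id
def pvAltLoop : List (List Char) → List Char → Bool
  | [], _ => false
  | p :: ps, cs =>
    if PySem.Chars.startswith cs (p ++ ['_']) then
      -- tail = node_id[len(prefix) + 1:]
      let tail := PySem.List.slice cs (some ((p.length : Int) + 1)) none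
      tail.length == 16 && tail.all (fun c => PySem.Chars.isIn [c] "0123456789abcdef".toList)
    else pvAltLoop ps cs

def validate_id_format_alt (node_id : String) : Bool :=
  if node_id.toList.isEmpty then false
  else pvAltLoop ["doc".toList, "sem".toList, "ent".toList, "rel".toList, "attr".toList, "comm".toList] node_id.toList

-- ===== PRECONDITION & SPEC =====
def Spec_validate_id_format (node_id : String) (out : Bool) : Prop := out = validate_id_format_alt node_id
instance (node_id : String) (out : Bool) : Decidable (Spec_validate_id_format node_id out) := by unfold Spec_validate_id_format; infer_instance

-- ===== CLAIM (what is proved, stated in full; the proofs are below) =====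
def Claim_equal_validate_id_format : Prop := ∀ (node_id : String), Dom_validate_id_format node_id → Spec_validate_id_format node_id (validate_id_format node_id)

-- ===== LEMMAS AND PROOFS =====

-- the hex-membership test both programs use, abbreviated for the proofs
def pvHexOk (c : Char) : Bool := PySem.Chars.isIn [c] "0123456789abcdef".toList

-- a fuel-free structural model of s.split('_') used only in the proofs
def pvSp (pre : List Char) : List Char → List (List Char)
  | [] => [pre]
  | c :: rest => if c = '_' then pre :: pvSp [] rest else pvSp (pre ++ [c]) rest

theorem pvGo_eq_sp (fuel : Nat) : ∀ (l cur : List Char) (acc : List (List Char)),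
    l.length < fuel →
    PySem.Chars.splitOn.go ['_'] fuel l cur acc = acc.reverse ++ pvSp cur.reverse l := by
  induction fuel with
  | zero => intro l _ _ h; omega
  | succ fuel ih =>
    intro l cur acc h
    cases l with
    | nil => simp [PySem.Chars.splitOn.go, pvSp]
    | cons c rest =>
      by_cases hc : c = '_'
      · subst hc
        rw [PySem.Chars.splitOn.go]
        simp only [List.isPrefixOf, BEq.rfl, Bool.true_and, if_true, List.length_cons,
          List.length_nil, List.drop_succ_cons, List.drop_zero]
        rw [ih rest [] (cur.reverse :: acc) (by simpa using Nat.lt_of_succ_lt_succ h)]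
        simp [pvSp]
      · rw [PySem.Chars.splitOn.go]
        have : (['_'].isPrefixOf (c :: rest)) = false := by
          simp [List.isPrefixOf]; exact fun h' => hc h'.symm
        rw [this]
        simp only [Bool.false_eq_true, if_false]
        rw [ih rest (c :: cur) acc (by simpa using Nat.lt_of_succ_lt_succ h)]
        simp [pvSp, hc]

theorem pvSplitOn_eq_sp (cs : List Char) : PySem.Chars.splitOn cs ['_'] = pvSp [] cs := by
  have := pvGo_eq_sp (cs.length + 1) cs [] [] (by omega)
  simpa [PySem.Chars.splitOn] using this

theorem pvSp_ne_nil (cs : List Char) : ∀ (pre : List Char), pvSp pre cs ≠ [] := by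
  induction cs with
  | nil => intro pre; simp [pvSp]
  | cons c rest ih =>
    intro pre
    by_cases hc : c = '_'
    · subst hc; simp [pvSp]
    · simpa [pvSp, if_neg hc] using ih (pre ++ [c])

theorem pvSp_single_iff (cs : List Char) : ∀ (pre x : List Char),
    pvSp pre cs = [x] ↔ ('_' ∉ cs ∧ x = pre ++ cs) := by
  induction cs with
  | nil => intro pre x; simp [pvSp]; tauto
  | cons c rest ih =>
    intro pre x
    by_cases hc : c = '_'
    · subst hc
      simp only [pvSp, if_pos rfl]
      constructor
      · intro h
        obtain ⟨-, h2⟩ := List.cons_eq_cons.mp h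
        exact absurd h2 (pvSp_ne_nil rest [])
      · rintro ⟨h1, -⟩
        exact absurd List.mem_cons_self h1
    · simp only [pvSp, if_neg hc, ih (pre ++ [c]) x, List.mem_cons]
      constructor
      · rintro ⟨h1, rfl⟩; exact ⟨fun h => h.elim (fun h => hc h.symm) h1, by simp⟩
      · rintro ⟨h1, rfl⟩; exact ⟨fun h => h1 (Or.inr h), by simp⟩

theorem pvSp_pair_iff (cs : List Char) : ∀ (pre a b : List Char),
    pvSp pre cs = [a, b] ↔ ∃ u, a = pre ++ u ∧ cs = u ++ '_' :: b ∧ '_' ∉ u ∧ '_' ∉ b := by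
  induction cs with
  | nil =>
    intro pre a b
    simp only [pvSp]
    constructor
    · intro h; simp at h
    · rintro ⟨u, -, h, -⟩; simp at h
  | cons c rest ih =>
    intro pre a b
    by_cases hc : c = '_'
    · subst hc
      simp only [pvSp, if_pos rfl]
      constructor
      · intro h
        obtain ⟨rfl, h2⟩ := List.cons_eq_cons.mp h
        obtain ⟨hb, rfl⟩ := (pvSp_single_iff rest [] b).mp h2
        exact ⟨[], by simp, by simp, by simp, by simpa using hb⟩
      · rintro ⟨u, rfl, hcs, hu, hb⟩
        cases u with
        | nil =>
          simp only [List.nil_append, List.cons_eq_cons] at hcs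
          obtain ⟨-, hrb⟩ := hcs
          subst hrb
          rw [(pvSp_single_iff rest [] rest).mpr ⟨hb, by simp⟩]
          simp
        | cons d u' =>
          obtain ⟨hd, -⟩ := List.cons_eq_cons.mp hcs
          subst hd
          exact absurd List.mem_cons_self hu
    · simp only [pvSp, if_neg hc, ih (pre ++ [c]) a b]
      constructor
      · rintro ⟨u, rfl, rfl, hu, hb⟩
        refine ⟨c :: u, by simp, rfl, ?_, hb⟩
        intro h
        rcases List.mem_cons.mp h with h | h
        · exact hc h.symm
        · exact hu h
      · rintro ⟨u, rfl, hcs, hu, hb⟩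
        cases u with
        | nil =>
          simp only [List.nil_append, List.cons_eq_cons] at hcs
          exact absurd hcs.1 hc
        | cons d u' =>
          obtain ⟨rfl, rfl⟩ := List.cons_eq_cons.mp hcs
          refine ⟨u', by simp, rfl, fun h => hu (List.mem_cons.mpr (Or.inr h)), hb⟩

-- the common characterisation both programs compute
def pvQ (P : List (List Char)) (cs : List Char) : Prop :=
  ∃ p ∈ P, ∃ t, cs = p ++ '_' :: t ∧ t.length = 16 ∧ ∀ c ∈ t, pvHexOk c = true

def pvP : List (List Char) :=
  ["doc".toList, "sem".toList, "ent".toList, "rel".toList, "attr".toList, "comm".toList]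

theorem pvLoop_iff (cs : List Char) : ∀ (P : List (List Char)),
    (∀ p ∈ P, ∀ q ∈ P, p ≠ q → (p ++ ['_']).isPrefixOf (q ++ ['_']) = false) →
    (pvAltLoop P cs = true ↔ pvQ P cs) := by
  intro P
  induction P with
  | nil => intro _; simp [pvAltLoop, pvQ]
  | cons q ps ih =>
    intro hP
    by_cases hs : PySem.Chars.startswith cs (q ++ ['_']) = true
    · obtain ⟨r, hr⟩ := (PySem.Chars.startswith_iff cs (q ++ ['_'])).mp hs
      simp only [pvAltLoop, if_pos hs]
      have hslice : PySem.List.slice cs (some ((q.length : Int) + 1)) none = r := by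
        rw [PySem.List.slice_from cs (by omega : (0:Int) ≤ (q.length : Int) + 1)]
        rw [← hr]
        have : ((q.length : Int) + 1).toNat = (q ++ ['_']).length := by simp
        rw [this, List.drop_left]
      rw [hslice]
      constructor
      · intro h
        refine ⟨q, List.mem_cons_self, r, ?_, ?_, ?_⟩
        · rw [← hr]; simp
        · simpa using (Bool.and_elim_left h)
        · intro c hc
          have := Bool.and_elim_right h
          rw [List.all_eq_true] at this
          simpa [pvHexOk] using this c hc
      · rintro ⟨p, hp, t, hcs, hlen, hhex⟩
        have hpq : p = q := by
          by_contra hne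
          have h1 : (p ++ ['_']) <+: cs := ⟨t, by rw [hcs]; simp⟩
          have h2 : (q ++ ['_']) <+: cs := ⟨r, hr⟩
          rcases List.prefix_or_prefix_of_prefix h1 h2 with h | h
          · have h' := List.isPrefixOf_iff_prefix.mpr h
            rw [hP p hp q List.mem_cons_self hne] at h'
            exact Bool.false_ne_true h'
          · have h' := List.isPrefixOf_iff_prefix.mpr h
            rw [hP q List.mem_cons_self p hp (fun h' => hne h'.symm)] at h'
            exact Bool.false_ne_true h'
        subst hpq
        have ht : t = r := by
          have : (p ++ ['_']) ++ t = (p ++ ['_']) ++ r := by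
            rw [hr, hcs]; simp
          exact List.append_cancel_left this
        subst ht
        refine Bool.and_eq_true_iff.mpr ⟨by simpa using hlen, ?_⟩
        rw [List.all_eq_true]
        intro c hc
        simpa [pvHexOk] using hhex c hc
    · simp only [pvAltLoop, if_neg hs]
      rw [ih (fun p hp q hq => hP p (List.mem_cons_of_mem _ hp) q (List.mem_cons_of_mem _ hq))]
      unfold pvQ
      constructor
      · rintro ⟨p, hp, t, h⟩; exact ⟨p, List.mem_cons_of_mem _ hp, t, h⟩
      · rintro ⟨p, hp, t, hcs, hrest⟩
        rcases List.mem_cons.mp hp with rfl | hp'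
        · exact absurd ((PySem.Chars.startswith_iff cs (p ++ ['_'])).mpr
            ⟨t, by rw [hcs]; simp⟩) hs
        · exact ⟨p, hp', t, hcs, hrest⟩

theorem pvA_iff (cs : List Char) (hne : cs ≠ []) :
    validate_id_format (String.ofList cs) = true ↔ pvQ pvP cs := by
  have hQsp : pvQ pvP cs → ∃ p ∈ pvP, ∃ t, pvSp [] cs = [p, t] ∧ t.length = 16 ∧ ∀ c ∈ t, pvHexOk c = true := by
    rintro ⟨p, hp, t, hcs, hlen, hhex⟩
    refine ⟨p, hp, t, ?_, hlen, hhex⟩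
    apply (pvSp_pair_iff cs [] p t).mpr
    refine ⟨p, by simp, hcs, ?_, ?_⟩
    · revert hp; have : ∀ p ∈ pvP, '_' ∉ p := by decide
      exact this p
    · intro h
      have := hhex '_' h
      simp [show pvHexOk '_' = false from by decide] at this
  unfold validate_id_format
  rw [String.toList_ofList]
  rw [if_neg (by simpa using hne)]
  simp only [pvSplitOn_eq_sp]
  rcases h : pvSp [] cs with _ | ⟨a, _ | ⟨b, _ | ⟨c', rest⟩⟩⟩
  · exact absurd h (pvSp_ne_nil cs [])
  · simp only [List.length_cons, List.length_nil]
    rw [if_pos (by omega)]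
    simp only [Bool.false_eq_true, false_iff]
    intro hQ
    obtain ⟨p, -, t, hsp, -⟩ := hQsp hQ
    rw [h] at hsp; simp at hsp
  · simp only [List.length_cons, List.length_nil]
    rw [if_neg (by omega)]
    constructor
    · intro hb
      simp only [Bool.and_eq_true] at hb
      obtain ⟨⟨h1, h2⟩, h3⟩ := hb
      refine ⟨a, ?_, b, ?_, by simpa using h2, ?_⟩
      · revert h1; unfold pvP; simp
      · obtain ⟨u, hu1, hu2, -, -⟩ := (pvSp_pair_iff cs [] a b).mp h
        rw [hu2, hu1]; simp
      · intro c hc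
        rw [List.all_eq_true] at h3
        simpa [pvHexOk] using h3 c hc
    · intro hQ
      obtain ⟨p, hp, t, hsp, hlen, hhex⟩ := hQsp hQ
      rw [h] at hsp
      obtain ⟨hp1, hsp2⟩ := List.cons_eq_cons.mp hsp
      obtain ⟨ht1, -⟩ := List.cons_eq_cons.mp hsp2
      subst hp1; subst ht1
      refine Bool.and_eq_true_iff.mpr ⟨Bool.and_eq_true_iff.mpr ⟨?_, by simpa using hlen⟩, ?_⟩
      · revert hp; unfold pvP; simp
      · rw [List.all_eq_true]
        intro c hc
        simpa [pvHexOk] using hhex c hc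
  · simp only [List.length_cons]
    rw [if_pos (by omega)]
    simp only [Bool.false_eq_true, false_iff]
    intro hQ
    obtain ⟨p, -, t, hsp, -⟩ := hQsp hQ
    rw [h] at hsp; simp at hsp

-- ===== VERDICT (by name: the statement is the Claim_ definition above) =====
theorem validate_id_format_spec : Claim_equal_validate_id_format := by
  intro s _
  unfold Spec_validate_id_format validate_id_format_alt
  by_cases h : s.toList = []
  · simp [validate_id_format, h]
  · rw [if_neg (by simpa using h)]
    rw [Bool.eq_iff_iff]
    have hA := pvA_iff s.toList h
    rw [String.ofList_toList] at hA
    rw [hA]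
    exact (pvLoop_iff s.toList pvP (by decide)).symm
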